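-- pv_equiv track=rewrite | github.com/JoelCunningham/SimpleNetworkMonitor | src/Services/Discovery/DiscoveryProtocols.py | _parse_upnp_response
-- ===== SOURCE A (Python) =====
-- from typing import List, Optional, Dict
--
-- def _parse_upnp_response(response: str) -> Optional[Dict[str, str]]:
--     """Parse UPnP response to extract device information."""
--     try:
--         lines = response.split('\r\n')
--         device_info: Dict[str, str] = {}
--
--         for line in lines:
--             if line.startswith('SERVER:'):
--                 device_info["device_name"] = line.split(':', 1)[1].strip()
--             elif line.startswith('ST:'):
--                 device_info["device_type"] = line.split(':', 1)[1].strip()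
--
--         return device_info if device_info else None
--     except (IndexError, AttributeError):
--         return None
-- ===== SOURCE B (Python) =====
-- def _parse_upnp_response(response):
--     """Parse UPnP response to extract device information."""
--     lines = response.split('\r\n')
--     headers = {}
--     for line in lines:
--         if ':' in line:
--             key, value = line.split(':', 1)
--             headers[key] = value.strip()
--     names = {'SERVER': 'device_name', 'ST': 'device_type'}
--     result = {names[k]: v for k, v in headers.items() if k in names}
--     return result or None
-- ===== Notes on version B (the rewrite author's own statement) =====
-- stated objective: idiomatic
-- what changed: Instead of testing each line against the two hard-coded prefixes and updating the result dict in the loop, B builds a generic header dict (key = text before the first colon, value stripped) in one pass and then constructs the result by a post-pass lookup/rename of the two wanted keys.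
import Mathlib
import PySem

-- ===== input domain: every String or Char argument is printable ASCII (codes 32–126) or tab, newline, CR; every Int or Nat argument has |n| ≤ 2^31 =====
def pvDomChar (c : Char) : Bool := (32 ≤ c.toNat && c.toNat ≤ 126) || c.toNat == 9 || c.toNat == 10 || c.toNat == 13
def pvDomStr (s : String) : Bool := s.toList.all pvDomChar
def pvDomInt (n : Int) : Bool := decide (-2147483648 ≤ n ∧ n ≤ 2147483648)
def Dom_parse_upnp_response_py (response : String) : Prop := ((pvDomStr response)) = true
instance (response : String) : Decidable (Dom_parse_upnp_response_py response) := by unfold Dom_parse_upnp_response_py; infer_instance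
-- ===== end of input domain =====

-- B replaces A's per-prefix branch updates by one generic header dict (key = text before the
-- first colon) built in a single pass, then a post-pass lookup/rename of the two wanted keys
-- (objective: idiomatic). Return-value equivalence; neither program mutates its argument.

-- ===== PORT A =====
-- value of line.split(':', 1)[1]  (none = IndexError, caught by A's except)
def pvASplitVal? (line : String) : Option String :=
  PySem.List.pyGet? ((PySem.Str.splitMax? line ":" 1).getD []) 1

-- one iteration of A's for-loop; none propagates the caught IndexError
def pvAStep (d : PySem.Dict String String) (line : String) :
    Option (PySem.Dict String String) :=
  if PySem.Str.startswith line "SERVER:" then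
    match pvASplitVal? line with
    | some v => some (d.insert "device_name" (PySem.Str.strip v))
    | none => none
  else if PySem.Str.startswith line "ST:" then
    match pvASplitVal? line with
    | some v => some (d.insert "device_type" (PySem.Str.strip v))
    | none => none
  else some d

def parse_upnp_response_py (response : String) : Option (List (String × String)) :=
  match ((PySem.Str.split? response "\r\n").getD []).foldl (fun acc line => acc.bind (fun d => pvAStep d line))
      (some (PySem.Dict.empty : PySem.Dict String String)) with
  | none => none
  | some d => if d.items.isEmpty then none else some d.items

-- ===== PORT B =====
-- one iteration of B's loop: headers[key] = value.strip() for any line containing ':'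
def pvBStep (h : PySem.Dict String String) (line : String) : PySem.Dict String String :=
  if PySem.Str.isIn ":" line then
    match (PySem.Str.splitMax? line ":" 1).getD [] with
    | [key, value] => h.insert key (PySem.Str.strip value)
    | _ => h  -- unreachable: split(':', 1) yields exactly two parts when ':' is in line
  else h

def pvNames : PySem.Dict String String :=
  PySem.Dict.ofList [("SERVER", "device_name"), ("ST", "device_type")]

def pvBResult (response : String) : PySem.Dict String String :=
  (((PySem.Str.split? response "\r\n").getD []).foldl pvBStep
      (PySem.Dict.empty : PySem.Dict String String)).items.foldl
    (fun r p => if pvNames.contains p.1 then r.insert (pvNames.getD p.1 "") p.2 else r)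
    (PySem.Dict.empty : PySem.Dict String String)

def parse_upnp_response_py_alt (response : String) : Option (List (String × String)) :=
  if (pvBResult response).items.isEmpty then none else some (pvBResult response).items

-- ===== PRECONDITION & SPEC =====
def Spec_parse_upnp_response_py (response : String) (out : Option (List (String × String))) : Prop := out = parse_upnp_response_py_alt response
instance (response : String) (out : Option (List (String × String))) : Decidable (Spec_parse_upnp_response_py response out) := by unfold Spec_parse_upnp_response_py; infer_instance

-- ===== CLAIM (what is proved, stated in full; the proofs are below) =====
def Claim_equal_parse_upnp_response_py : Prop := ∀ (response : String), Dom_parse_upnp_response_py response → Spec_parse_upnp_response_py response (parse_upnp_response_py response)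

-- ===== LEMMAS AND PROOFS =====

-- B's post-pass, as a list function: keep the SERVER/ST entries, renamed
def pvF (items : List (String × String)) : List (String × String) :=
  (items.filter (fun p => pvNames.contains p.1)).map
    (fun p => (pvNames.getD p.1 "", p.2))

lemma pvNames_contains (k : String) :
    pvNames.contains k = (k == "SERVER" || k == "ST") := by
  have hmk : pvNames = PySem.Dict.mk [("SERVER", "device_name"), ("ST", "device_type")] := rfl
  rw [hmk, PySem.Dict.contains_mk]
  by_cases h1 : k = "SERVER"
  · subst h1; decide
  · by_cases h2 : k = "ST"
    · subst h2; decide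
    · simp [beq_eq_false_iff_ne.mpr (Ne.symm h1), beq_eq_false_iff_ne.mpr (Ne.symm h2),
        beq_eq_false_iff_ne.mpr h1, beq_eq_false_iff_ne.mpr h2]

lemma pv_go_m0 (sep : List Char) (fuel : Nat) (l cur : List Char) (acc : List (List Char)) :
    PySem.Chars.splitOnMax.go sep fuel 0 l cur acc = ((cur.reverse ++ l) :: acc).reverse := by
  cases fuel <;> cases l <;> simp [PySem.Chars.splitOnMax.go]

lemma pv_go_m1 (l : List Char) : ∀ (fuel : Nat) (cur : List Char) (acc : List (List Char)),
    l.length < fuel →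
    PySem.Chars.splitOnMax.go [':'] fuel 1 l cur acc =
      if ':' ∈ l then
        acc.reverse ++ [cur.reverse ++ l.takeWhile (· ≠ ':'), (l.dropWhile (· ≠ ':')).tail]
      else acc.reverse ++ [cur.reverse ++ l] := by
  induction l with
  | nil =>
    intro fuel cur acc hf
    match fuel, hf with
    | fuel + 1, _ => simp [PySem.Chars.splitOnMax.go]
  | cons c rest ih =>
    intro fuel cur acc hf
    match fuel, hf with
    | fuel + 1, hf =>
      by_cases hc : c = ':'
      · subst hc
        simp [PySem.Chars.splitOnMax.go, List.isPrefixOf, pv_go_m0]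
      · have hpre : ([':'].isPrefixOf (c :: rest)) = false := by
          simp [List.isPrefixOf, Ne.symm hc]
        have hrec : PySem.Chars.splitOnMax.go [':'] (fuel + 1) 1 (c :: rest) cur acc =
            PySem.Chars.splitOnMax.go [':'] fuel 1 rest (c :: cur) acc := by
          simp [PySem.Chars.splitOnMax.go, hpre]
        rw [hrec, ih fuel (c :: cur) acc (Nat.lt_of_succ_lt_succ hf)]
        by_cases hm : ':' ∈ rest <;>
          simp [hm, hc, Ne.symm hc]

lemma pv_parts (line : String) (h : ':' ∈ line.toList) :
    (PySem.Str.splitMax? line ":" 1).getD [] =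
      [String.ofList (line.toList.takeWhile (· ≠ ':')),
       String.ofList ((line.toList.dropWhile (· ≠ ':')).tail)] := by
  have hsep : (":" : String).toList = [':'] := rfl
  have h1 : PySem.Chars.splitOnMax line.toList [':'] 1 =
      [line.toList.takeWhile (· ≠ ':'), (line.toList.dropWhile (· ≠ ':')).tail] := by
    unfold PySem.Chars.splitOnMax
    rw [if_neg (by norm_num)]
    rw [show (1 : Int).toNat = 1 from rfl,
      pv_go_m1 line.toList (line.toList.length + 1) [] [] (Nat.lt_succ_self _)]
    simp [h]
  show (Option.map (fun x => List.map String.ofList x)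
      (PySem.Chars.splitMax? line.toList (":" : String).toList 1)).getD [] = _
  rw [hsep]
  unfold PySem.Chars.splitMax?
  rw [if_neg (by simp), h1]
  rfl

lemma pv_isIn_colon (line : String) : PySem.Str.isIn ":" line = true ↔ ':' ∈ line.toList := by
  rw [PySem.Str.isIn_iff_infix]
  have hsep : (":" : String).toList = [':'] := rfl
  rw [hsep]
  constructor
  · intro hin
    have := hin.sublist
    simpa using this
  · intro hm
    obtain ⟨s, t, hst⟩ := List.append_of_mem hm
    exact ⟨s, t, by rw [hst]; simp⟩

lemma pv_takeWhile_key (k t : List Char) (hk : ':' ∉ k) :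
    (k ++ ':' :: t).takeWhile (· ≠ ':') = k := by
  induction k with
  | nil => simp
  | cons a k' ih =>
    have ha : a ≠ ':' := fun hh => hk (by simp [hh])
    have hk2 : ':' ∉ k' := fun hh => hk (List.mem_cons_of_mem _ hh)
    simpa [ha] using ih hk2

lemma pv_dropWhile_head {p : Char → Bool} (l : List Char) (a : Char) (t : List Char)
    (h : l.dropWhile p = a :: t) : p a = false := by
  induction l with
  | nil => simp at h
  | cons c rest ih =>
    rw [List.dropWhile_cons] at h
    by_cases hc : p c
    · rw [if_pos hc] at h; exact ih h
    · rw [if_neg hc] at h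
      cases h
      exact Bool.not_eq_true _ ▸ hc

lemma pv_dropWhile_ne_nil (l : List Char) (h : ':' ∈ l) :
    l.dropWhile (· ≠ ':') ≠ [] := by
  induction l with
  | nil => simp at h
  | cons c rest ih =>
    rw [List.dropWhile_cons]
    by_cases hc : c = ':'
    · simp [hc]
    · have hr : ':' ∈ rest := by
        rcases List.mem_cons.mp h with h1 | h1
        · exact absurd h1.symm hc
        · exact h1
      simpa [hc] using ih hr

lemma pv_startswith_iff (line : String) (k : String) (hk : ':' ∉ k.toList)
    (h : ':' ∈ line.toList) :
    PySem.Str.startswith line (String.ofList (k.toList ++ [':'])) = true ↔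
      line.toList.takeWhile (· ≠ ':') = k.toList := by
  show (String.ofList (k.toList ++ [':'])).toList.isPrefixOf line.toList = true ↔ _
  rw [String.toList_ofList, List.isPrefixOf_iff_prefix]
  constructor
  · rintro ⟨t, ht⟩
    rw [← ht, List.append_assoc, List.singleton_append]
    exact pv_takeWhile_key _ _ hk
  · intro ht
    cases hdw : line.toList.dropWhile (· ≠ ':') with
    | nil => exact absurd hdw (pv_dropWhile_ne_nil _ h)
    | cons a t =>
      have ha : a = ':' := by
        have := pv_dropWhile_head _ _ _ hdw
        simpa using this
      refine ⟨t, ?_⟩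
      conv_rhs => rw [← List.takeWhile_append_dropWhile (p := fun c => decide (c ≠ ':'))
        (l := line.toList)]
      rw [hdw, ht, ha]
      simp

lemma pv_startswith_of_nocolon (line k : String) (hk : ':' ∈ k.toList)
    (h : ':' ∉ line.toList) : PySem.Str.startswith line k = false := by
  cases hsw : PySem.Str.startswith line k
  · rfl
  · exfalso
    have : k.toList.isPrefixOf line.toList = true := hsw
    rw [List.isPrefixOf_iff_prefix] at this
    exact h (this.subset hk)

lemma pv_any_key (d : PySem.Dict String String) (n : String) :
    d.contains n = d.items.any (fun p => p.1 == n) := rfl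

lemma pv_contains_corr (h d : PySem.Dict String String) (hi : d.items = pvF h.items) :
    d.contains "device_name" = h.contains "SERVER" ∧
    d.contains "device_type" = h.contains "ST" := by
  constructor <;>
  · rw [pv_any_key, pv_any_key, hi]
    unfold pvF
    rw [List.any_map, List.any_filter]
    refine PySem.List.any_congr_mem ?_
    intro p _
    have g1 : pvNames.getD "SERVER" "" = "device_name" := by decide
    have g2 : pvNames.getD "ST" "" = "device_type" := by decide
    rw [pvNames_contains]
    by_cases h1 : p.1 = "SERVER"
    · simp [h1, g1]
    · by_cases h2 : p.1 = "ST"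
      · simp [h2, g2]
      · simp [beq_eq_false_iff_ne.mpr h1, beq_eq_false_iff_ne.mpr h2]

lemma pv_F_insert (h d : PySem.Dict String String) (hi : d.items = pvF h.items)
    (key name w : String) (hc : pvNames.contains key = true)
    (hn : pvNames.getD key "" = name)
    (hcorr : d.contains name = h.contains key)
    (hother : ∀ p : String, pvNames.contains p = true → p ≠ key → pvNames.getD p "" ≠ name) :
    (d.insert name w).items = pvF ((h.insert key w).items) := by
  by_cases hck : h.contains key = true
  · have hdn : d.contains name = true := by rw [hcorr]; exact hck
    rw [PySem.Dict.items_insert_of_contains _ _ hck,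
      PySem.Dict.items_insert_of_contains _ _ hdn, hi]
    unfold pvF
    rw [List.filter_map]
    have hfe : List.filter ((fun p => pvNames.contains p.1) ∘
          (fun p => if (p.1 == key) = true then (key, w) else p)) h.items =
        List.filter (fun p => pvNames.contains p.1) h.items := by
      apply List.filter_congr
      intro p _
      by_cases hp : p.1 = key <;> simp [hp, Function.comp]
    rw [hfe]
    simp only [List.map_map]
    apply List.map_congr_left
    intro p hp
    have hcp : pvNames.contains p.1 = true := (List.mem_filter.mp hp).2
    by_cases hpk : p.1 = key
    · simp [Function.comp, hpk, hn]
    · have hne : pvNames.getD p.1 "" ≠ name := hother p.1 hcp hpk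
      simp [Function.comp, hpk, hne]
  · have hck' : h.contains key = false := by simpa using hck
    have hdn : d.contains name = false := by rw [hcorr]; exact hck'
    rw [PySem.Dict.items_insert_of_not_contains _ _ hck',
      PySem.Dict.items_insert_of_not_contains _ _ hdn, hi]
    unfold pvF
    rw [List.filter_append, List.map_append]
    simp [hc, hn]

lemma pv_F_insert_other (h : PySem.Dict String String) (key w : String)
    (hc : pvNames.contains key = false) :
    pvF ((h.insert key w).items) = pvF h.items := by
  by_cases hck : h.contains key = true
  · rw [PySem.Dict.items_insert_of_contains _ _ hck]
    unfold pvF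
    rw [List.filter_map]
    have hfe : List.filter ((fun p => pvNames.contains p.1) ∘
          (fun p => if (p.1 == key) = true then (key, w) else p)) h.items =
        List.filter (fun p => pvNames.contains p.1) h.items := by
      apply List.filter_congr
      intro p _
      by_cases hp : p.1 = key <;> simp [hp, Function.comp, hc]
    rw [hfe]
    simp only [List.map_map]
    apply List.map_congr_left
    intro p hp
    have hcp : pvNames.contains p.1 = true := (List.mem_filter.mp hp).2
    have hpk : p.1 ≠ key := fun hh => by rw [hh, hc] at hcp; exact Bool.false_ne_true hcp
    simp [Function.comp, hpk]
  · have hck' : h.contains key = false := by simpa using hck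
    rw [PySem.Dict.items_insert_of_not_contains _ _ hck']
    unfold pvF
    rw [List.filter_append, List.map_append]
    simp [hc]

lemma pv_step_sim (h d : PySem.Dict String String) (line : String)
    (hi : d.items = pvF h.items) :
    ∃ d', pvAStep d line = some d' ∧ d'.items = pvF ((pvBStep h line).items) := by
  by_cases hcol : ':' ∈ line.toList
  · have hparts := pv_parts line hcol
    set tw := line.toList.takeWhile (· ≠ ':') with htw
    set v := String.ofList ((line.toList.dropWhile (· ≠ ':')).tail) with hv
    have hB : pvBStep h line = h.insert (String.ofList tw) (PySem.Str.strip v) := by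
      unfold pvBStep
      rw [if_pos ((pv_isIn_colon line).2 hcol), hparts]
    have hval : pvASplitVal? line = some v := by
      unfold pvASplitVal?
      rw [hparts]
      rfl
    have hswS := pv_startswith_iff line "SERVER" (by decide) hcol
    have hswT := pv_startswith_iff line "ST" (by decide) hcol
    rw [show String.ofList ("SERVER".toList ++ [':']) = "SERVER:" by decide] at hswS
    rw [show String.ofList ("ST".toList ++ [':']) = "ST:" by decide] at hswT
    by_cases h1 : tw = "SERVER".toList
    · have hs : PySem.Str.startswith line "SERVER:" = true := hswS.2 h1
      have hA : pvAStep d line = some (d.insert "device_name" (PySem.Str.strip v)) := by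
        unfold pvAStep
        rw [hs, hval]
        simp
      refine ⟨_, hA, ?_⟩
      rw [hB, show String.ofList tw = "SERVER" from by rw [h1]; rfl]
      refine pv_F_insert h d hi "SERVER" "device_name" _ (by decide) (by decide)
        (pv_contains_corr h d hi).1 ?_
      intro p hp hne
      rw [pvNames_contains] at hp
      have hp' : p = "SERVER" ∨ p = "ST" := by simpa using hp
      rcases hp' with rfl | rfl
      · exact absurd rfl hne
      · decide
    · by_cases h2 : tw = "ST".toList
      · have hsf : PySem.Str.startswith line "SERVER:" = false := by
          cases hx : PySem.Str.startswith line "SERVER:"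
          · rfl
          · exact absurd (hswS.1 hx) h1
        have hs : PySem.Str.startswith line "ST:" = true := hswT.2 h2
        have hA : pvAStep d line = some (d.insert "device_type" (PySem.Str.strip v)) := by
          unfold pvAStep
          rw [hsf, hs, hval]
          simp
        refine ⟨_, hA, ?_⟩
        rw [hB, show String.ofList tw = "ST" from by rw [h2]; rfl]
        refine pv_F_insert h d hi "ST" "device_type" _ (by decide) (by decide)
          (pv_contains_corr h d hi).2 ?_
        intro p hp hne
        rw [pvNames_contains] at hp
        have hp' : p = "SERVER" ∨ p = "ST" := by simpa using hp
        rcases hp' with rfl | rfl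
        · decide
        · exact absurd rfl hne
      · have hsf : PySem.Str.startswith line "SERVER:" = false := by
          cases hx : PySem.Str.startswith line "SERVER:"
          · rfl
          · exact absurd (hswS.1 hx) h1
        have htf : PySem.Str.startswith line "ST:" = false := by
          cases hx : PySem.Str.startswith line "ST:"
          · rfl
          · exact absurd (hswT.1 hx) h2
        have hA : pvAStep d line = some d := by
          unfold pvAStep
          rw [hsf, htf]
          simp
        have hkey : pvNames.contains (String.ofList tw) = false := by
          rw [pvNames_contains]
          have e1 : String.ofList tw ≠ "SERVER" := by
            intro hh
            exact h1 (by rw [← String.toList_ofList (l := tw), hh])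
          have e2 : String.ofList tw ≠ "ST" := by
            intro hh
            exact h2 (by rw [← String.toList_ofList (l := tw), hh])
          simp [e1, e2]
        refine ⟨d, hA, ?_⟩
        rw [hB, pv_F_insert_other h _ _ hkey]
        exact hi
  · have hin : PySem.Str.isIn ":" line = false := by
      cases hx : PySem.Str.isIn ":" line
      · rfl
      · exact absurd ((pv_isIn_colon line).1 hx) hcol
    have hB : pvBStep h line = h := by
      unfold pvBStep
      rw [hin]
      simp
    have hsf : PySem.Str.startswith line "SERVER:" = false :=
      pv_startswith_of_nocolon line "SERVER:" (by decide) hcol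
    have htf : PySem.Str.startswith line "ST:" = false :=
      pv_startswith_of_nocolon line "ST:" (by decide) hcol
    have hA : pvAStep d line = some d := by
      unfold pvAStep
      rw [hsf, htf]
      simp
    exact ⟨d, hA, by rw [hB]; exact hi⟩

lemma pv_fold_sim (lines : List String) : ∀ (d h : PySem.Dict String String),
    d.items = pvF h.items →
    ∃ d', lines.foldl (fun acc line => acc.bind (fun d => pvAStep d line)) (some d) = some d' ∧
      d'.items = pvF ((lines.foldl pvBStep h).items) := by
  induction lines with
  | nil => exact fun d h hi => ⟨d, rfl, hi⟩
  | cons l ls ih =>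
    intro d h hi
    obtain ⟨d1, ha, hi1⟩ := pv_step_sim h d l hi
    obtain ⟨d', ha', hi'⟩ := ih d1 (pvBStep h l) hi1
    refine ⟨d', ?_, hi'⟩
    rw [List.foldl_cons, show ((some d).bind fun d => pvAStep d l) = pvAStep d l from rfl, ha]
    exact ha'

lemma pv_nodup_foldB (lines : List String) : ∀ (h : PySem.Dict String String),
    h.keys.Nodup → ((lines.foldl pvBStep h).keys).Nodup := by
  have hstep : ∀ (h : PySem.Dict String String) (line : String),
      h.keys.Nodup → ((pvBStep h line).keys).Nodup := by
    intro h line hnd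
    unfold pvBStep
    split
    · split
      · exact PySem.Dict.nodup_keys_insert _ _ _ hnd
      · exact hnd
    · exact hnd
  induction lines with
  | nil => exact fun h hnd => hnd
  | cons l ls ih =>
    intro h hnd
    exact ih _ (hstep h l hnd)

lemma pv_result_items (H : PySem.Dict String String) (hnd : H.keys.Nodup) :
    (H.items.foldl
      (fun r p => if pvNames.contains p.1 then r.insert (pvNames.getD p.1 "") p.2 else r)
      (PySem.Dict.empty : PySem.Dict String String)).items = pvF H.items := by
  have hsplit : ∀ (l : List (String × String)) (init : PySem.Dict String String),
      l.foldl (fun r p => if pvNames.contains p.1 then r.insert (pvNames.getD p.1 "") p.2 else r)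
          init =
        (l.filter (fun p => pvNames.contains p.1)).foldl
          (fun r p => r.insert (pvNames.getD p.1 "") p.2) init := by
    intro l
    induction l with
    | nil => intro init; rfl
    | cons x xs ih =>
      intro init
      by_cases hx : pvNames.contains x.1 = true
      · simp [hx, ih]
      · have hx' : pvNames.contains x.1 = false := by simpa using hx
        simp [hx', ih]
  rw [hsplit]
  have h1 : ((H.items.filter (fun p => pvNames.contains p.1)).map (fun p => p.1)).Nodup := by
    have hs : List.Sublist ((H.items.filter (fun p => pvNames.contains p.1)).map (fun p => p.1))
        (H.items.map (fun p => p.1)) := List.Sublist.map _ List.filter_sublist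
    exact (show (H.items.map (fun p => p.1)).Nodup from hnd).sublist hs
  have h2 : ((H.items.filter (fun p => pvNames.contains p.1)).map
      (fun p => pvNames.getD p.1 "")).Nodup := by
    rw [show (fun p : String × String => pvNames.getD p.1 "") =
        (fun s => pvNames.getD s "") ∘ (fun p : String × String => p.1) from rfl,
      ← List.map_map]
    apply List.Nodup.map_on ?_ h1
    intro x hx y hy hf
    have hcx : pvNames.contains x = true := by
      rcases List.mem_map.mp hx with ⟨p, hp, rfl⟩
      exact (List.mem_filter.mp hp).2
    have hcy : pvNames.contains y = true := by
      rcases List.mem_map.mp hy with ⟨p, hp, rfl⟩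
      exact (List.mem_filter.mp hp).2
    rw [pvNames_contains] at hcx hcy
    have hx' : x = "SERVER" ∨ x = "ST" := by simpa using hcx
    have hy' : y = "SERVER" ∨ y = "ST" := by simpa using hcy
    rcases hx' with rfl | rfl <;> rcases hy' with rfl | rfl <;> first | rfl | (exfalso; exact absurd hf (by decide))
  have hfr := PySem.Dict.items_foldl_insert_fresh
    (l := List.filter (fun p => pvNames.contains p.1) H.items)
    (k := fun p : String × String => pvNames.getD p.1 "")
    (v := fun p : String × String => p.2)
    (d := (PySem.Dict.empty : PySem.Dict String String))
    (fun a _ => PySem.Dict.contains_empty _) h2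
  simpa [pvF] using hfr

-- ===== VERDICT (by name: the statement is the Claim_ definition above) =====
theorem parse_upnp_response_py_spec : Claim_equal_parse_upnp_response_py := by
  intro response _
  unfold Spec_parse_upnp_response_py parse_upnp_response_py parse_upnp_response_py_alt pvBResult
  obtain ⟨d', ha, hi⟩ := pv_fold_sim ((PySem.Str.split? response "\r\n").getD [])
    PySem.Dict.empty PySem.Dict.empty rfl
  rw [ha, pv_result_items _ (pv_nodup_foldB _ _ PySem.Dict.nodup_keys_empty)]
  dsimp only
  rw [hi]
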